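-- pv_equiv track=rewrite | github.com/pjsacchet/Linux-RAT | DGA/DGA.py | generateAGDs
-- ===== SOURCE A (Python) =====
-- tlds = ['.csc840.lan', '.com', '.press', '.me', '.cc']
--
-- rand_letters = ['b', 'c', 'd', 'f', 'g', 'h', 'j', 'k', 'l', 'm', 'n', 'p', 'q', 'r', 's', 't', 'v', 'w', 'x', 'z', '0', '1', '2', '3', '4', '5', '6', '7', '8', '9',
--                 'b', 'c', 'd', 'f', 'g', 'h', 'j', 'k', 'l', 'm', 'n', 'p', 'q', 'r', 's', 't', 'v', 'w', 'x', 'z', '0', '1', '2', '3', '4', '5', '6', '7', '8', '9',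
--                 'b', 'c', 'd', 'f', 'g', 'h', 'j', 'k', 'l', 'm', 'n', 'p', 'q', 'r', 's', 't', 'v', 'w', 'x', 'z', '0', '1', '2', '3', '4', '5', '6', '7', '8', '9',
--                 'b', 'c', 'd', 'f', 'g', 'h', 'j', 'k', 'l', 'm', 'n', 'p', 'q', 'r', 's', 't', 'v', 'w', 'x', 'z', '0', '1', '2', '3', '4', '5', '6', '7', '8', '9',
--                 'b', 'c', 'd', 'f', 'g', 'h', 'j', 'k', 'l', 'm', 'n', 'p', 'q', 'r', 's', 't', 'v', 'w', 'x', 'z', '0', '1', '2', '3', '4', '5', '6', '7', '8', '9']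
--
-- def generateAGDs(seed : int) -> list:
--     agds = []
--     count = 0 # the total number of domains we've generated
--     tld_index = 0 # our index into our tld array
--     offset_add = 0 # will use this to continously walk through our letters
--
--     # Generate 10 domains, each between 9-15 characters (we will do 10)
--     while (count < 10):
--         agd_count = 0 # total number of agd letters
--         agd = '' # empty string to add letters to
--
--         # Use the salt to grab our letters and form our domain
--         while (agd_count < 10): # we are hard setting this to 10 characters since we cannot be random
--             offset = 0
--
--             # Make sure we dont go over 127
--             if (seed + offset_add > len(rand_letters)):
--                 offset = seed - offset_add
--
--             else:
--                 offset = seed + offset_add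
--
--             agd += rand_letters[offset] # offset seed with our agd count
--             agd_count += 1
--
--             # 10 letters * 10 strings mean this should only be 100 at most...
--             if (offset_add == 127):
--                 offset_add = 0
--
--             else:
--                 offset_add += 1
--
--         # Done with our letters so add our TLD then add to list
--         if (tld_index > 4):
--             tld_index = 0 # reset our tld index
--
--         agd += tlds[tld_index]
--         tld_index += 1
--
--         agds.append(agd)
--         count += 1
--
--     return agds
-- ===== SOURCE B (Python) =====
-- tlds = ['.csc840.lan', '.com', '.press', '.me', '.cc']
-- _LETTERS = "bcdfghjklmnpqrstvwxz0123456789"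
--
-- def generateAGDs(seed: int) -> list:
--     # rand_letters is the 30-char alphabet repeated 5 times, so for any in-range
--     # index j (after Python's negative wrap) rand_letters[j] == _LETTERS[j % 30].
--     stream = ''.join(_LETTERS[(seed + i) % 30] for i in range(100))
--     return [stream[10 * k:10 * k + 10] + tlds[k % 5] for k in range(10)]
-- ===== Notes on version B (the rewrite author's own statement) =====
-- stated objective: simpler
-- what changed: B replaces the nested while loops with stateful offset/tld counters and the 150-entry lookup table by a closed-form modular index into the 30-character alphabet ((seed+i) % 30), building one 100-character stream and slicing it into ten 10-character chunks with cycled TLDs.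
import Mathlib
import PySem

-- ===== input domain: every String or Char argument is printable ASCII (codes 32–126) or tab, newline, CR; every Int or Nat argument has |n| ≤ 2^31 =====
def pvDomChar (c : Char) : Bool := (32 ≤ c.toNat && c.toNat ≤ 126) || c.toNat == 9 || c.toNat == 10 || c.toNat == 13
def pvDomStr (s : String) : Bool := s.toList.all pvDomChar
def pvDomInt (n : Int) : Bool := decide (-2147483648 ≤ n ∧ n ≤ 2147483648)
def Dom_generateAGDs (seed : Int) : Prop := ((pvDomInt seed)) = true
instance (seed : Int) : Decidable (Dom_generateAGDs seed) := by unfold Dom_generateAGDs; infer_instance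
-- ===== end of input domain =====

-- ===== PORT A =====
-- B replaces A's stateful nested while-loops and 150-entry table by a modular
-- closed form into the 30-char alphabet plus slicing of one flat stream (objective: simpler).
def tldsA : List String := [".csc840.lan", ".com", ".press", ".me", ".cc"]

def randLettersA : List String := ["b", "c", "d", "f", "g", "h", "j", "k", "l", "m", "n", "p", "q", "r", "s", "t", "v", "w", "x", "z", "0", "1", "2", "3", "4", "5", "6", "7", "8", "9", "b", "c", "d", "f", "g", "h", "j", "k", "l", "m", "n", "p", "q", "r", "s", "t", "v", "w", "x", "z", "0", "1", "2", "3", "4", "5", "6", "7", "8", "9", "b", "c", "d", "f", "g", "h", "j", "k", "l", "m", "n", "p", "q", "r", "s", "t", "v", "w", "x", "z", "0", "1", "2", "3", "4", "5", "6", "7", "8", "9", "b", "c", "d", "f", "g", "h", "j", "k", "l", "m", "n", "p", "q", "r", "s", "t", "v", "w", "x", "z", "0", "1", "2", "3", "4", "5", "6", "7", "8", "9", "b", "c", "d", "f", "g", "h", "j", "k", "l", "m", "n", "p", "q", "r", "s", "t", "v", "w", "x", "z", "0", "1", "2", "3", "4", "5", "6", "7", "8", "9"]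

-- inner while (agd_count < 10): fuel = remaining iterations, state (agd, offset_add)
def innerA (seed : Int) : Nat → String → Int → String × Int
  | 0, agd, offset_add => (agd, offset_add)
  | Nat.succ k, agd, offset_add =>
      let offset : Int :=
        if seed + offset_add > (randLettersA.length : Int) then seed - offset_add
        else seed + offset_add
      let agd := agd ++ ((PySem.List.pyGet? randLettersA offset).getD "")  -- IndexError excluded by Pre_
      let offset_add := if offset_add = 127 then 0 else offset_add + 1
      innerA seed k agd offset_add

-- outer while (count < 10): state (agds, tld_index, offset_add)
def outerA (seed : Int) : Nat → List String → Int → Int → List String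
  | 0, agds, _, _ => agds
  | Nat.succ k, agds, tld_index, offset_add =>
      let p := innerA seed 10 "" offset_add
      let tld_index := if tld_index > 4 then 0 else tld_index
      let agd := p.1 ++ ((PySem.List.pyGet? tldsA tld_index).getD "")
      outerA seed k (agds ++ [agd]) (tld_index + 1) p.2

def generateAGDs (seed : Int) : List String := outerA seed 10 [] 0 0

-- ===== PORT B =====
def tldsB : List String := [".csc840.lan", ".com", ".press", ".me", ".cc"]

def lettersB : String := "bcdfghjklmnpqrstvwxz0123456789"

def generateAGDs_alt (seed : Int) : List String :=
  let stream : String :=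
    PySem.Str.join ""
      ((List.range 100).map (fun i =>
        ((PySem.Str.pyGet? lettersB (PySem.Int.mod (seed + (i : Int)) 30)).map
          (fun c => String.ofList [c])).getD ""))
  (List.range 10).map (fun k =>
    PySem.Str.slice stream (some ((10 * k : Nat) : Int)) (some ((10 * k + 10 : Nat) : Int)) ++
      ((PySem.List.pyGet? tldsB ((k : Int) % 5)).getD ""))

-- ===== PRECONDITION & SPEC =====
-- Pre_: exactly the seeds on which A returns; for any other seed some rand_letters[offset]
-- index leaves [-150, 149] and Python raises IndexError.
def Pre_generateAGDs (seed : Int) : Prop := -150 ≤ seed ∧ seed ≤ 50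
instance (seed : Int) : Decidable (Pre_generateAGDs seed) := by unfold Pre_generateAGDs; infer_instance

def pvWitness_generateAGDs : Int := (7)

def Spec_generateAGDs (seed : Int) (out : List String) : Prop := out = generateAGDs_alt seed
instance (seed : Int) (out : List String) : Decidable (Spec_generateAGDs seed out) := by unfold Spec_generateAGDs; infer_instance

-- ===== CLAIM (what is proved, stated in full; the proofs are below) =====
def Claim_equal_generateAGDs : Prop := ∀ (seed : Int), Dom_generateAGDs seed → Pre_generateAGDs seed → Spec_generateAGDs seed (generateAGDs seed)

-- ===== LEMMAS AND PROOFS =====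
-- proof-only helpers
def letterA (j : Int) : String := (PySem.List.pyGet? randLettersA j).getD ""

def cB (j : Int) : Char := (PySem.Str.pyGet? lettersB (PySem.Int.mod j 30)).getD ' '

def pieceB (j : Int) : String :=
  ((PySem.Str.pyGet? lettersB (PySem.Int.mod j 30)).map (fun c => String.ofList [c])).getD ""

def chunkStr (seed : Int) : Nat → Int → String
  | 0, _ => ""
  | m + 1, c => letterA (seed + c) ++ chunkStr seed m (c + 1)

def tldStr (r : Nat) : String := (PySem.List.pyGet? tldsA (r : Int)).getD ""

set_option maxRecDepth 10000 in
theorem randLettersA_len : (randLettersA.length : Int) = 150 := by decide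

set_option maxRecDepth 100000 in
set_option maxHeartbeats 1000000 in
theorem letterA_eq_ball : ∀ n : Nat, n < 300 →
    letterA ((n : Int) - 150) = pieceB ((n : Int) - 150) := by decide

theorem letterA_eq (j : Int) (h1 : -150 ≤ j) (h2 : j < 150) : letterA j = pieceB j := by
  have hn : (j + 150).toNat < 300 := by omega
  have hc : ((j + 150).toNat : Int) - 150 = j := by omega
  have := letterA_eq_ball (j + 150).toNat hn
  rwa [hc] at this

theorem pieceB_eq (j : Int) : pieceB j = String.ofList [cB j] := by
  obtain ⟨x, hx⟩ : ∃ x, PySem.List.pyGet? lettersB.toList (PySem.Int.mod j 30) = some x := by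
    have h0 := PySem.Int.mod_nonneg j (b := 30) (by norm_num)
    have h1 := PySem.Int.mod_lt j (b := 30) (by norm_num)
    have hl : (lettersB.toList.length : Int) = 30 := by decide
    exact ⟨_, PySem.List.pyGet?_eq_some_getElem _ h0 (by omega)⟩
  simp only [pieceB, cB, PySem.Str.pyGet?, PySem.Chars.pyGet?, hx,
    Option.map_some, Option.getD_some]

theorem innerA_eq (seed : Int) (hs : seed ≤ 50) :
    ∀ (m : Nat) (c : Int) (agd : String), 0 ≤ c → c + m ≤ 100 →
      innerA seed m agd c = (agd ++ chunkStr seed m c, c + m) := by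
  intro m
  induction m with
  | zero => intro c agd _ _; simp [innerA, chunkStr]
  | succ m ih =>
    intro c agd h0 h1
    have hiff : ¬ (seed + c > (randLettersA.length : Int)) := by rw [randLettersA_len]; omega
    have h127 : ¬ (c = 127) := by omega
    have h1' : c + (m : Int) + 1 ≤ 100 := by push_cast at h1; omega
    simp only [innerA, if_neg hiff, if_neg h127]
    rw [ih (c + 1) _ (by omega) (by omega)]
    refine Prod.ext ?_ (by push_cast; ring)
    show (agd ++ letterA (seed + c)) ++ chunkStr seed m (c + 1) = agd ++ chunkStr seed (m + 1) c
    rw [String.append_assoc]; rfl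

theorem chunkStr_toList (seed : Int) (hlo : -150 ≤ seed) (hhi : seed ≤ 50) :
    ∀ (m : Nat) (c : Int), 0 ≤ c → c + m ≤ 100 →
      (chunkStr seed m c).toList = (List.range m).map (fun (j : Nat) => cB (seed + c + (j : Int))) := by
  intro m
  induction m with
  | zero => intro c _ _; simp [chunkStr]
  | succ m ih =>
    intro c h0 h1
    have h1' : c + (m : Int) + 1 ≤ 100 := by push_cast at h1; omega
    have hA : letterA (seed + c) = pieceB (seed + c) := letterA_eq _ (by omega) (by omega)
    rw [List.range_succ_eq_map, List.map_cons]
    show (letterA (seed + c) ++ chunkStr seed m (c + 1)).toList = _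
    rw [String.toList_append, hA, pieceB_eq, String.toList_ofList,
        ih (c + 1) (by omega) (by omega), List.map_map, List.singleton_append]
    congr 1
    · norm_num
    · refine List.map_congr_left ?_
      intro j _
      simp only [Function.comp_apply]
      congr 1
      push_cast
      ring

theorem dropTake_map_range {α : Type} (f : Nat → α) (d m n : Nat) (h : d + m ≤ n) :
    (((List.range n).map f).drop d).take m = (List.range m).map (fun j => f (d + j)) := by
  apply List.ext_getElem
  · simp; omega
  · intro i h1 h2
    simp

theorem outerA_eq (seed : Int) (hs : seed ≤ 50) :
    ∀ (m k : Nat) (t : Int) (acc : List String), k + m = 10 →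
      0 ≤ t → t ≤ 5 → (if t = 5 then 0 else t) = ((k % 5 : Nat) : Int) →
      outerA seed m acc t (10 * (k : Int)) =
        acc ++ (List.range m).map
          (fun (j : Nat) => chunkStr seed 10 (((10 * (k + j) : Nat) : Int)) ++ tldStr ((k + j) % 5)) := by
  intro m
  induction m with
  | zero => intro k t acc _ _ _ _; simp [outerA]
  | succ m ih =>
    intro k t acc hkm ht0 ht5 hinv
    have hk9 : k ≤ 9 := by omega
    have hmod : (k % 5 : Nat) < 5 := by omega
    simp only [outerA]
    rw [innerA_eq seed hs 10 (10 * (k : Int)) "" (by positivity) (by push_cast; omega)]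
    have hidx : (if t > 4 then (0 : Int) else t) = ((k % 5 : Nat) : Int) := by
      split_ifs with h
      · have h5 : t = 5 := by omega
        simpa [h5] using hinv
      · have h5 : ¬ (t = 5) := by omega
        simpa [h5] using hinv
    simp only [hidx]
    have hoff : (10 * (k : Int) + 10) = 10 * (((k + 1 : Nat)) : Int) := by push_cast; ring
    have hinv' : (if ((k % 5 : Nat) : Int) + 1 = 5 then (0 : Int) else ((k % 5 : Nat) : Int) + 1)
        = (((k + 1) % 5 : Nat) : Int) := by
      split_ifs with h <;> · push_cast at h ⊢; omega
    simp only [Nat.cast_ofNat]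
    rw [hoff, ih (k + 1) _ _ (by omega) (by positivity) (by push_cast; omega) hinv']
    rw [List.append_assoc]
    congr 1
    rw [List.range_succ_eq_map, List.map_cons, List.map_map, List.singleton_append]
    congr 1
    refine List.map_congr_left ?_
    intro j _
    simp only [Function.comp_apply, Nat.succ_eq_add_one]
    have e3 : k + 1 + j = k + (j + 1) := by omega
    rw [e3]

-- ===== VERDICT (by name: the statement is the Claim_ definition above) =====
set_option maxHeartbeats 1000000 in
theorem generateAGDs_spec : Claim_equal_generateAGDs := by
  intro seed _ hpre
  obtain ⟨hlo, hhi⟩ := hpre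
  unfold Spec_generateAGDs
  have hA : generateAGDs seed =
      (List.range 10).map
        (fun (k : Nat) => chunkStr seed 10 (((10 * k : Nat) : Int)) ++ tldStr (k % 5)) := by
    have h := outerA_eq seed hhi 10 0 0 [] (by omega) (by omega) (by omega) (by norm_num)
    norm_num at h
    simpa [generateAGDs] using h
  rw [hA]
  unfold generateAGDs_alt
  refine List.map_congr_left ?_
  intro k hk
  have hk10 : k < 10 := List.mem_range.mp hk
  apply String.toList_inj.mp
  have hstream :
      (PySem.Str.join ""
        ((List.range 100).map (fun i =>
          ((PySem.Str.pyGet? lettersB (PySem.Int.mod (seed + (i : Int)) 30)).map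
            (fun c => String.ofList [c])).getD ""))).toList
      = (List.range 100).map (fun (i : Nat) => cB (seed + (i : Int))) := by
    show (PySem.Str.join "" ((List.range 100).map (fun (i : Nat) => pieceB (seed + (i : Int))))).toList = _
    simp only [pieceB_eq]
    simp only [PySem.Str.join]
    rw [List.map_map]
    have : (String.toList ∘ fun (i : Nat) => String.ofList [cB (seed + (i : Int))])
        = (fun c => [c]) ∘ (fun (i : Nat) => cB (seed + (i : Int))) := by
      funext i; simp
    rw [this, ← List.map_map]
    simpa using PySem.Chars.join_nil_singletons ((List.range 100).map (fun (i : Nat) => cB (seed + (i : Int))))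
  rw [String.toList_append, String.toList_append]
  congr 1
  · -- the 10-character chunk
    rw [chunkStr_toList seed hlo hhi 10 ((10 * k : Nat) : Int) (by positivity) (by push_cast; omega)]
    simp only [PySem.Str.slice, hstream, String.toList_ofList]
    have hsl : PySem.Chars.slice
        ((List.range 100).map (fun (i : Nat) => cB (seed + (i : Int))))
        (some ((10 * k : Nat) : Int)) (some ((10 * k + 10 : Nat) : Int))
        = ((((List.range 100).map (fun (i : Nat) => cB (seed + (i : Int)))).drop (10 * k)).take 10) := by
      show PySem.List.slice _ _ _ = _
      rw [PySem.List.slice_natCast]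
      congr 1
      omega
    rw [hsl, dropTake_map_range _ (10 * k) 10 100 (by omega)]
    refine List.map_congr_left ?_
    intro j _
    congr 1
    push_cast
    ring
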